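-- pv_equiv track=rewrite | github.com/wackybuddy/obcms | src/coordination/management/commands/backfill_organization_locations.py | _find_single_match
-- ===== SOURCE A (Python) =====
-- def _find_single_match(normalized_text: str, lookup: dict):
--     """Return a matched instance if exactly one label is detected."""
--
--     candidates = []
--     for key, instance in lookup.items():
--         if not key:
--             continue
--         if f" {key} " in f" {normalized_text} ":
--             candidates.append(instance)
--
--     if len(candidates) == 1:
--         return candidates[0]
--     return None
-- ===== SOURCE B (Python) =====
-- def _find_single_match(normalized_text: str, lookup: dict):
--     """Index every space-delimited span of the padded text into a hash set once,
--     then test each lookup key with one O(1) membership check; stop at a second hit."""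
--     padded = f" {normalized_text} "
--     positions = [i for i, c in enumerate(padded) if c == " "]
--     spans = set()
--     for a in range(len(positions)):
--         for b in range(a + 1, len(positions)):
--             spans.add(padded[positions[a] + 1:positions[b]])
--     match = None
--     for key, instance in lookup.items():
--         if key and key in spans:
--             if match is not None:
--                 return None
--             match = instance
--     return match
-- ===== Notes on version B (the rewrite author's own statement) =====
-- stated objective: faster
-- what changed: B precomputes the set of all space-delimited spans of the padded text once and answers each lookup key by a single hash-set membership test, stopping at a second match, instead of running a substring scan of the whole text for every key.
import Mathlib
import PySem

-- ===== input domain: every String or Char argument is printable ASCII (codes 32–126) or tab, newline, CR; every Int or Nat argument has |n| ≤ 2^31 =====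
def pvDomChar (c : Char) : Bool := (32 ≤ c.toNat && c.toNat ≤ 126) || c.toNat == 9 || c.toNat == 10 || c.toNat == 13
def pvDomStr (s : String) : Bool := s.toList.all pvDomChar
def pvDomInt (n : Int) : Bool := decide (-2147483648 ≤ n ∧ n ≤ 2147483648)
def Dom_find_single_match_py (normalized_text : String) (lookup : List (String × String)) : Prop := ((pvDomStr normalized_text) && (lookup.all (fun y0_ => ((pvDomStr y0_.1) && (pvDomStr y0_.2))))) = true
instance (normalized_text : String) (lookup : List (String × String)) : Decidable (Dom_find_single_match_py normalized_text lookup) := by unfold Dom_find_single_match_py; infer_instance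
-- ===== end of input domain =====

-- B indexes every space-delimited span of the padded text into a set once and then answers each
-- lookup key by one membership test, stopping at a second hit (alternative algorithm; same results).

-- ===== PORT A =====
-- A: collect every matching instance in a list, then return it iff exactly one was found
def find_single_match_py (normalized_text : String) (lookup : List (String × String)) : Option String :=
  (fun candidates =>
    if candidates.length = 1 then PySem.List.pyGet? candidates 0 else none)
  (lookup.foldl (fun acc kv =>
    if kv.1.toList = [] then acc
    else if PySem.Chars.isIn (' ' :: kv.1.toList ++ [' ']) (' ' :: normalized_text.toList ++ [' ']) = true
      then acc ++ [kv.2]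
    else acc) [])

-- ===== PORT B =====
-- positions = [i for i, c in enumerate(padded) if c == " "]
def pvPos (padded : List Char) : List Int :=
  (PySem.List.enumerate padded 0).filterMap (fun ic => if ic.2 = ' ' then some ic.1 else none)

-- spans = { padded[positions[a]+1 : positions[b]] | a < b }
def pvSpans (padded : List Char) : PySem.Set (List Char) :=
  (List.range (pvPos padded).length).foldl (fun s (a : Nat) =>
    (List.range' (a + 1) ((pvPos padded).length - (a + 1))).foldl (fun s (b : Nat) =>
      PySem.Set.add s (PySem.List.slice padded
        (some (PySem.List.pyGetD (pvPos padded) (a : Int) 0 + 1))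
        (some (PySem.List.pyGetD (pvPos padded) (b : Int) 0)))) s)
    PySem.Set.empty

-- the key loop: at most one match kept; a second match returns None at once
def pvScan (spans : PySem.Set (List Char)) : List (String × String) → Option String → Option String
  | [], m => m
  | kv :: rest, m =>
    if kv.1.toList ≠ [] ∧ PySem.Set.contains spans kv.1.toList = true then
      match m with
      | none => pvScan spans rest (some kv.2)
      | some _ => none
    else pvScan spans rest m

def find_single_match_py_alt (normalized_text : String) (lookup : List (String × String)) : Option String :=
  pvScan (pvSpans (' ' :: normalized_text.toList ++ [' '])) lookup none

-- ===== PRECONDITION & SPEC =====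
def Spec_find_single_match_py (normalized_text : String) (lookup : List (String × String)) (out : Option String) : Prop := out = find_single_match_py_alt normalized_text lookup
instance (normalized_text : String) (lookup : List (String × String)) (out : Option String) : Decidable (Spec_find_single_match_py normalized_text lookup out) := by unfold Spec_find_single_match_py; infer_instance

-- ===== CLAIM (what is proved, stated in full; the proofs are below) =====
def Claim_equal_find_single_match_py : Prop := ∀ (normalized_text : String) (lookup : List (String × String)), Dom_find_single_match_py normalized_text lookup → Spec_find_single_match_py normalized_text lookup (find_single_match_py normalized_text lookup)

-- ===== LEMMAS AND PROOFS =====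

-- "x occurs in p delimited by spaces at positions i < j"
def pvOcc (p x : List Char) : Prop :=
  ∃ i j : Nat, i < j ∧ j < p.length ∧ p[i]? = some ' ' ∧ p[j]? = some ' ' ∧
    x = (p.drop (i + 1)).take (j - (i + 1))

-- A's per-key test as a Bool predicate
def pvTestA (padded : List Char) (kv : String × String) : Bool :=
  !decide (kv.1.toList = []) && PySem.Chars.isIn (' ' :: kv.1.toList ++ [' ']) padded

-- B's per-key test as a Bool predicate
def pvTestB (spans : PySem.Set (List Char)) (kv : String × String) : Bool :=
  !decide (kv.1.toList = []) && PySem.Set.contains spans kv.1.toList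

theorem pvTestB_true {spans : PySem.Set (List Char)} {kv : String × String}
    (h : kv.1.toList ≠ [] ∧ PySem.Set.contains spans kv.1.toList = true) :
    pvTestB spans kv = true := by
  unfold pvTestB
  rw [Bool.and_eq_true, Bool.not_eq_true', decide_eq_false_iff_not]
  exact h

theorem pvTestB_false {spans : PySem.Set (List Char)} {kv : String × String}
    (h : ¬ (kv.1.toList ≠ [] ∧ PySem.Set.contains spans kv.1.toList = true)) :
    pvTestB spans kv = false := by
  unfold pvTestB
  rcases Decidable.not_and_iff_not_or_not.mp h with h1 | h2
  · rw [Decidable.not_not] at h1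
    rw [decide_eq_true h1]; rfl
  · rw [(Bool.not_eq_true _).mp h2, Bool.and_false]

theorem pvTestA_true {padded : List Char} {kv : String × String}
    (h1 : ¬ kv.1.toList = []) (h2 : PySem.Chars.isIn (' ' :: kv.1.toList ++ [' ']) padded = true) :
    pvTestA padded kv = true := by
  unfold pvTestA
  rw [Bool.and_eq_true, Bool.not_eq_true', decide_eq_false_iff_not]
  exact ⟨h1, h2⟩

theorem pvTestA_false {padded : List Char} {kv : String × String}
    (h : kv.1.toList = [] ∨ ¬ PySem.Chars.isIn (' ' :: kv.1.toList ++ [' ']) padded = true) :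
    pvTestA padded kv = false := by
  unfold pvTestA
  rcases h with h1 | h2
  · rw [decide_eq_true h1]; rfl
  · rw [(Bool.not_eq_true _).mp h2, Bool.and_false]

theorem pv_isIn_iff_occ (p x : List Char) :
    PySem.Chars.isIn (' ' :: x ++ [' ']) p = true ↔ pvOcc p x := by
  rw [PySem.Chars.isIn_iff_infix]
  constructor
  · rintro ⟨s, t, hp⟩
    refine ⟨s.length, s.length + 1 + x.length, by omega, ?_, ?_, ?_, ?_⟩
    · rw [← hp]; simp; omega
    · rw [← hp, List.append_assoc, List.getElem?_append_right (le_refl _)]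
      simp
    · have h : s ++ (' ' :: x ++ [' ']) ++ t = (s ++ [' '] ++ x) ++ (' ' :: t) := by simp
      rw [← hp, h, List.getElem?_append_right (by simp; omega)]
      have h0 : s.length + 1 + x.length - (s ++ [' '] ++ x).length = 0 := by simp; omega
      rw [h0]
      rfl
    · have h : s ++ (' ' :: x ++ [' ']) ++ t = (s ++ [' ']) ++ (x ++ ' ' :: t) := by simp
      rw [← hp, h, List.drop_left' (by simp)]
      rw [show s.length + 1 + x.length - (s.length + 1) = x.length by omega]
      exact (List.take_left' rfl).symm
  · rintro ⟨i, j, hij, hj, hi', hj', rfl⟩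
    have hi : i < p.length := (List.getElem?_eq_some_iff.mp hi').1
    have hpi : p[i] = ' ' := (List.getElem?_eq_some_iff.mp hi').2
    have hpj : p[j] = ' ' := (List.getElem?_eq_some_iff.mp hj').2
    refine ⟨p.take i, p.drop (j + 1), ?_⟩
    have h2 : List.drop (i + 1) p = (List.drop (i + 1) p).take (j - (i + 1)) ++ List.drop j p := by
      conv_lhs => rw [← List.take_append_drop (j - (i + 1)) (List.drop (i + 1) p)]
      rw [List.drop_drop]
      congr 2
      omega
    conv_rhs => rw [← List.take_append_drop i p, List.drop_eq_getElem_cons hi, hpi, h2,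
      List.drop_eq_getElem_cons hj, hpj]
    simp

theorem pv_mem_foldl_add {α β : Type} [BEq α] [LawfulBEq α] (g : β → α) (l : List β)
    (s0 : PySem.Set α) (x : α) :
    x ∈ l.foldl (fun s b => PySem.Set.add s (g b)) s0 ↔ x ∈ s0 ∨ ∃ b ∈ l, x = g b := by
  induction l generalizing s0 with
  | nil => simp
  | cons b rest ih =>
    rw [List.foldl_cons, ih, PySem.Set.mem_add]
    simp only [List.mem_cons]
    constructor
    · rintro ((h | h) | ⟨b', hb', rfl⟩)
      · exact .inl h
      · exact .inr ⟨b, .inl rfl, h⟩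
      · exact .inr ⟨b', .inr hb', rfl⟩
    · rintro (h | ⟨b', (rfl | hb'), rfl⟩)
      · exact .inl (.inl h)
      · exact .inl (.inr rfl)
      · exact .inr ⟨b', hb', rfl⟩

theorem pv_mem_double {α : Type} [BEq α] [LawfulBEq α] (F : Nat → Nat → α)
    (inner : Nat → List Nat) (L : List Nat) (s0 : PySem.Set α) (x : α) :
    x ∈ L.foldl (fun s a => (inner a).foldl (fun s b => PySem.Set.add s (F a b)) s) s0 ↔
      x ∈ s0 ∨ ∃ a ∈ L, ∃ b ∈ inner a, x = F a b := by
  induction L generalizing s0 with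
  | nil => simp
  | cons a rest ih =>
    rw [List.foldl_cons, ih, pv_mem_foldl_add]
    simp only [List.mem_cons]
    constructor
    · rintro ((h | ⟨b, hb, rfl⟩) | ⟨a', ha', hb⟩)
      · exact .inl h
      · exact .inr ⟨a, .inl rfl, b, hb, rfl⟩
      · exact .inr ⟨a', .inr ha', hb⟩
    · rintro (h | ⟨a', (rfl | ha'), hb⟩)
      · exact .inl (.inl h)
      · exact .inl (.inr hb)
      · exact .inr ⟨a', ha', hb⟩

theorem pv_mem_pvPos (p : List Char) (z : Int) :
    z ∈ pvPos p ↔ ∃ k : Nat, ∃ _h : k < p.length, z = (k : Int) ∧ p[k] = ' ' := by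
  unfold pvPos
  rw [List.mem_filterMap]
  constructor
  · rintro ⟨ic, hic, hf⟩
    rcases (PySem.List.mem_enumerate_iff p 0 ic).mp hic with ⟨k, hk, rfl⟩
    by_cases hc : p[k] = ' '
    · simp only [hc] at hf
      exact ⟨k, hk, by simpa using hf.symm, hc⟩
    · simp only [if_neg hc] at hf
      exact absurd hf (by simp)
  · rintro ⟨k, hk, rfl, hc⟩
    exact ⟨((k : Int), p[k]), (PySem.List.mem_enumerate_iff p 0 _).mpr ⟨k, hk, by simp⟩,
      by simp [hc]⟩

theorem pv_pvPos_pairwise (p : List Char) : (pvPos p).Pairwise (· < ·) := by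
  unfold pvPos
  refine List.Pairwise.filterMap _ ?_ (PySem.List.pairwise_lt_enumerate p 0)
  intro a a' h b hb b' hb'
  by_cases hc : a.2 = ' ' <;> by_cases hc' : a'.2 = ' ' <;> simp_all

theorem pv_getD_cast (p : List Char) (a : Nat) (ha : a < (pvPos p).length) :
    PySem.List.pyGetD (pvPos p) (a : Int) 0 = (pvPos p)[a] := by
  rw [PySem.List.pyGetD_natCast, List.getD_eq_getElem _ _ ha]

theorem pv_mem_spans_iff_occ (p x : List Char) : x ∈ pvSpans p ↔ pvOcc p x := by
  unfold pvSpans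
  rw [pv_mem_double (fun a b => PySem.List.slice p
        (some (PySem.List.pyGetD (pvPos p) (a : Int) 0 + 1))
        (some (PySem.List.pyGetD (pvPos p) (b : Int) 0)))
      (fun a => List.range' (a + 1) ((pvPos p).length - (a + 1)))
      (List.range (pvPos p).length) PySem.Set.empty x]
  have hempty : x ∉ (PySem.Set.empty : PySem.Set (List Char)) := by
    simp [PySem.Set.empty]
  constructor
  · rintro (h | ⟨a, ha, b, hb, rfl⟩)
    · exact absurd h hempty
    · rw [List.mem_range] at ha
      rw [List.mem_range'_1] at hb
      have hb' : b < (pvPos p).length := by omega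
      rcases (pv_mem_pvPos p _).mp (List.getElem_mem ha) with ⟨i, hi, hia, hci⟩
      rcases (pv_mem_pvPos p _).mp (List.getElem_mem hb') with ⟨j, hj, hjb, hcj⟩
      have hlt : ((pvPos p)[a] : Int) < (pvPos p)[b] :=
        (List.pairwise_iff_getElem.mp (pv_pvPos_pairwise p)) a b ha hb' (by omega)
      rw [hia, hjb] at hlt
      have hij : i < j := by exact_mod_cast hlt
      refine ⟨i, j, hij, hj, List.getElem?_eq_some_iff.mpr ⟨hi, hci⟩,
        List.getElem?_eq_some_iff.mpr ⟨hj, hcj⟩, ?_⟩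
      rw [pv_getD_cast p a ha, pv_getD_cast p b hb', hia, hjb]
      rw [show ((i : Int) + 1) = ((i + 1 : Nat) : Int) by push_cast; ring]
      rw [PySem.List.slice_natCast]
  · rintro ⟨i, j, hij, hj, hi', hj', rfl⟩
    have hi : i < p.length := (List.getElem?_eq_some_iff.mp hi').1
    have hci : p[i] = ' ' := (List.getElem?_eq_some_iff.mp hi').2
    have hcj : p[j] = ' ' := (List.getElem?_eq_some_iff.mp hj').2
    have hmi : ((i : Int)) ∈ pvPos p := (pv_mem_pvPos p _).mpr ⟨i, hi, rfl, hci⟩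
    have hmj : ((j : Int)) ∈ pvPos p := (pv_mem_pvPos p _).mpr ⟨j, hj, rfl, hcj⟩
    rcases List.mem_iff_getElem.mp hmi with ⟨a, ha, hea⟩
    rcases List.mem_iff_getElem.mp hmj with ⟨b, hb, heb⟩
    have hab : a < b := by
      rcases lt_trichotomy a b with h | h | h
      · exact h
      · exfalso
        subst h
        have hje : (i : Int) = (j : Int) := by rw [← hea, heb]
        have : i = j := by exact_mod_cast hje
        omega
      · exfalso
        have hlt := (List.pairwise_iff_getElem.mp (pv_pvPos_pairwise p)) b a hb ha h
        rw [hea, heb] at hlt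
        have : j < i := by exact_mod_cast hlt
        omega
    refine .inr ⟨a, List.mem_range.mpr ha, b, List.mem_range'_1.mpr ⟨by omega, by omega⟩, ?_⟩
    rw [pv_getD_cast p a ha, pv_getD_cast p b hb, hea, heb]
    rw [show ((i : Int) + 1) = ((i + 1 : Nat) : Int) by push_cast; ring]
    rw [PySem.List.slice_natCast]

theorem pv_test_eq (padded : List Char) (kv : String × String) :
    pvTestB (pvSpans padded) kv = pvTestA padded kv := by
  unfold pvTestA pvTestB
  congr 1
  rw [Bool.eq_iff_iff, PySem.Set.contains_iff]
  exact (pv_mem_spans_iff_occ padded kv.1.toList).trans (pv_isIn_iff_occ padded kv.1.toList).symm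

theorem pv_cand_eq (padded : List Char) (l : List (String × String)) (acc : List String) :
    l.foldl (fun acc kv =>
      if kv.1.toList = [] then acc
      else if PySem.Chars.isIn (' ' :: kv.1.toList ++ [' ']) padded = true then acc ++ [kv.2]
      else acc) acc = acc ++ (l.filter (pvTestA padded)).map Prod.snd := by
  induction l generalizing acc with
  | nil => simp
  | cons kv rest ih =>
    rw [List.foldl_cons, List.filter_cons]
    by_cases h1 : kv.1.toList = []
    · rw [if_pos h1, pvTestA_false (.inl h1), if_neg (by simp), ih]
    · rw [if_neg h1]
      by_cases h2 : PySem.Chars.isIn (' ' :: kv.1.toList ++ [' ']) padded = true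
      · rw [if_pos h2, pvTestA_true h1 h2, if_pos rfl, ih]
        simp
      · rw [if_neg h2, pvTestA_false (.inr h2), if_neg (by simp), ih]

theorem pv_scan_some (spans : PySem.Set (List Char)) (l : List (String × String)) (v : String) :
    pvScan spans l (some v) =
      match l.filter (pvTestB spans) with
      | [] => some v
      | _ => none := by
  induction l with
  | nil => rfl
  | cons kv rest ih =>
    rw [List.filter_cons]
    by_cases h : kv.1.toList ≠ [] ∧ PySem.Set.contains spans kv.1.toList = true
    · rw [pvScan, if_pos h, pvTestB_true h, if_pos rfl]
    · rw [pvScan, if_neg h, pvTestB_false h, if_neg (by simp), ih]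

theorem pv_scan_none (spans : PySem.Set (List Char)) (l : List (String × String)) :
    pvScan spans l none =
      match (l.filter (pvTestB spans)).map Prod.snd with
      | [x] => some x
      | _ => none := by
  induction l with
  | nil => rfl
  | cons kv rest ih =>
    rw [List.filter_cons]
    by_cases h : kv.1.toList ≠ [] ∧ PySem.Set.contains spans kv.1.toList = true
    · rw [pvScan, if_pos h, pvTestB_true h, if_pos rfl, pv_scan_some]
      cases hf : rest.filter (pvTestB spans) <;> rfl
    · rw [pvScan, if_neg h, pvTestB_false h, if_neg (by simp), ih]

-- ===== VERDICT (by name: the statement is the Claim_ definition above) =====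
theorem find_single_match_py_spec : Claim_equal_find_single_match_py := by
  intro t lookup _dom
  unfold Spec_find_single_match_py find_single_match_py find_single_match_py_alt
  rw [pv_cand_eq, pv_scan_none,
    List.filter_congr (fun kv _ => pv_test_eq (' ' :: t.toList ++ [' ']) kv),
    List.nil_append]
  cases hm : (lookup.filter (pvTestA (' ' :: t.toList ++ [' ']))).map Prod.snd with
  | nil => rfl
  | cons x rest =>
    cases rest with
    | nil => rfl
    | cons y r =>
      show (if (x :: y :: r).length = 1 then PySem.List.pyGet? (x :: y :: r) 0 else none) = _
      rw [if_neg (by simp)]
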